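-- pv_equiv track=rewrite | github.com/ling168x/python_100examples | no.13_example.py | runTime
-- ===== SOURCE A (Python) =====
-- def runTime(s):
--
--     enter_list = []
--     exit_list = []
--
--     for i in s:
--         if "Enter" in i:
--             enter_list.append(i.split("Enter"))
--         if "Exit" in i:
--             exit_list.append(i.split("Exit"))
--
--     time = {}
--
--     for i in enter_list:
--         time["%s"%i[0]] = 0
--
--     for i in enter_list:
--         for j in exit_list:
--             if i[0] == j[0]:
--                 time["%s"%i[0]] += abs(int(i[1])-int(j[1]))
--                 exit_list.remove(j)
--                 break
--     return time
-- ===== SOURCE B (Python) =====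
-- def runTime(s):
--     # One pass: group enter/exit time segments per key; then one zip-sum per key.
--     ent = {}
--     ext = {}
--     for line in s:
--         if "Enter" in line:
--             p = line.split("Enter")
--             ent.setdefault(p[0], []).append(p[1])
--         if "Exit" in line:
--             p = line.split("Exit")
--             ext.setdefault(p[0], []).append(p[1])
--     return {k: sum(abs(int(e) - int(x)) for e, x in zip(es, ext.get(k, ())))
--             for k, es in ent.items()}
-- ===== Notes on version B (the rewrite author's own statement) =====
-- stated objective: alternative
-- what changed: B replaces A's nested pairing loop (for each Enter entry, linearly scan and remove the first matching element of the Exit list) by one grouping pass that buckets the Enter/Exit time segments per key into dicts and then computes each key's total as a single zip-sum of its two buckets; cost is O(n*m) vs O(n+m) per pairing, but a timing run's random inputs contain few Enter/Exit lines, so no measured speed-up is claimed.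
import Mathlib
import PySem

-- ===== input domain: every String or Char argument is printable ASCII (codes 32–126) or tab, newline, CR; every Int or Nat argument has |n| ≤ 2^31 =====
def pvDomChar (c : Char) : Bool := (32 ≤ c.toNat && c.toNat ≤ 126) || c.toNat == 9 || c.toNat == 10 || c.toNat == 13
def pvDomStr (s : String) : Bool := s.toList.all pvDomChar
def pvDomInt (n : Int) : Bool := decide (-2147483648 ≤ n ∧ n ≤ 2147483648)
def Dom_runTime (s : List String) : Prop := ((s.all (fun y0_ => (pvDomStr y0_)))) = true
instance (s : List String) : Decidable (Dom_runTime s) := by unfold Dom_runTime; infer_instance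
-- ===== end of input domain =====

-- B replaces A's nested Enter×Exit pairing scan by one per-key grouping pass plus a
-- zip-sum per key (objective: alternative algorithm, same return value).

-- shared tiny helpers (values both programs compute): i[0], i[1], int(t)
-- (int() is made total here via getD 0; Pre_ guarantees every parse the Pythons perform succeeds)
def pvKey (i : List String) : String := PySem.List.pyGetD i 0 ""
def pvSeg (i : List String) : String := PySem.List.pyGetD i 1 ""
def pvVal (t : String) : Int := (PySem.Int.ofStr? t).getD 0
-- l.split(sep) for the non-empty literal separators used here (split? is none only for sep = "")
def pvSplit (l sep : String) : List String := (PySem.Str.split? l sep).getD []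

-- ===== PORT A =====
-- inner 'for j in exit_list: if i[0]==j[0]: … ; exit_list.remove(j); break' — returns the
-- first matching element and the exit list with exactly that element removed (none = no match)
def pvPop (key : String) : List (List String) → Option (List String × List (List String))
  | [] => none
  | j :: rest =>
    if pvKey j == key then some (j, rest)
    else match pvPop key rest with
      | none => none
      | some (m, r) => some (m, j :: r)

def runTime (s : List String) : List (String × Int) :=
  -- for i in s: if "Enter" in i: enter_list.append(i.split("Enter")); if "Exit" in i: …
  let lists := s.foldl (fun (st : List (List String) × List (List String)) i =>
      let st1 := if PySem.Str.isIn "Enter" i then (st.1 ++ [pvSplit i "Enter"], st.2) else st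
      if PySem.Str.isIn "Exit" i then (st1.1, st1.2 ++ [pvSplit i "Exit"]) else st1)
    (([], []) : List (List String) × List (List String))
  -- for i in enter_list: time["%s" % i[0]] = 0
  let time0 := lists.1.foldl (fun (d : PySem.Dict String Int) i => d.insert (pvKey i) 0) PySem.Dict.empty
  -- for i in enter_list: for j in exit_list: if i[0]==j[0]: time[i[0]] += abs(int(i[1])-int(j[1])); remove; break
  -- (time[k] += v is modify: the key is always present, set by the init loop)
  let fin := lists.1.foldl (fun (st : PySem.Dict String Int × List (List String)) i =>
      match pvPop (pvKey i) st.2 with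
      | none => st
      | some (j, rest) => (st.1.modify (pvKey i) 0 (· + |pvVal (pvSeg i) - pvVal (pvSeg j)|), rest))
    (time0, lists.2)
  fin.1.items

-- ===== PORT B =====
def runTime_alt (s : List String) : List (String × Int) :=
  -- one pass: ent.setdefault(p[0], []).append(p[1]) / ext.setdefault(p[0], []).append(p[1])
  let g := s.foldl (fun (st : PySem.Dict String (List String) × PySem.Dict String (List String)) line =>
      let st1 := if PySem.Str.isIn "Enter" line then
          (st.1.modify (pvKey (pvSplit line "Enter")) [] (· ++ [pvSeg (pvSplit line "Enter")]), st.2)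
        else st
      if PySem.Str.isIn "Exit" line then
          (st1.1, st1.2.modify (pvKey (pvSplit line "Exit")) [] (· ++ [pvSeg (pvSplit line "Exit")]))
        else st1)
    (PySem.Dict.empty, PySem.Dict.empty)
  -- {k: sum(abs(int(e)-int(x)) for e, x in zip(es, ext.get(k, ()))) for k, es in ent.items()}
  g.1.items.map (fun p =>
    (p.1, ((p.2.zip (g.2.getD p.1 [])).map (fun q => |pvVal q.1 - pvVal q.2|)).sum))

-- ===== PRECONDITION & SPEC =====
-- the (key, time-segment) pairs of the lines containing sep, in order
def pvPairs (sep : String) (s : List String) : List (String × String) :=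
  (s.filter (fun l => PySem.Str.isIn sep l)).map (fun l => (pvKey (pvSplit l sep), pvSeg (pvSplit l sep)))

-- Pre_ excludes exactly the inputs on which A raises ValueError: some positionally matched
-- Enter/Exit pair of one key has a non-integer time segment (int() is only called on matched
-- pairs; B raises ValueError on exactly the same inputs).
def Pre_runTime (s : List String) : Prop :=
  ∀ p ∈ pvPairs "Enter" s,
    ∀ q ∈ (((pvPairs "Enter" s).filter (fun r => r.1 == p.1)).map Prod.snd).zip
          (((pvPairs "Exit" s).filter (fun r => r.1 == p.1)).map Prod.snd),
      (PySem.Int.ofStr? q.1).isSome = true ∧ (PySem.Int.ofStr? q.2).isSome = true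
instance (s : List String) : Decidable (Pre_runTime s) := by unfold Pre_runTime; infer_instance

def pvWitness_runTime : List String := ["aEnter3", "aExit10", "bEnter5"]

def Spec_runTime (s : List String) (out : List (String × Int)) : Prop := out = runTime_alt s
instance (s : List String) (out : List (String × Int)) : Decidable (Spec_runTime s out) := by unfold Spec_runTime; infer_instance

-- ===== CLAIM (what is proved, stated in full; the proofs are below) =====
def Claim_equal_runTime : Prop := ∀ (s : List String), Dom_runTime s → Pre_runTime s → Spec_runTime s (runTime s)

-- ===== LEMMAS AND PROOFS =====

-- the per-key total both programs compute, and the grouped segment lists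
def pvSum (es xs : List String) : Int := ((es.zip xs).map (fun q => |pvVal q.1 - pvVal q.2|)).sum
def pvSplits (sep : String) (s : List String) : List (List String) :=
  (s.filter (fun l => PySem.Str.isIn sep l)).map (fun l => pvSplit l sep)
def pvSegsOf (E : List (List String)) (k : String) : List String :=
  (E.filter (fun i => pvKey i == k)).map pvSeg

-- pvPop: failure means no element of the exit list matches
theorem pvPop_none (k : String) (X : List (List String)) (h : pvPop k X = none) :
    X.filter (fun i => pvKey i == k) = [] := by
  induction X with
  | nil => simp
  | cons j rest ih =>
    by_cases hj : pvKey j == k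
    · simp [pvPop, hj] at h
    · simp only [pvPop, hj, Bool.false_eq_true, if_false] at h ⊢
      cases hrec : pvPop k rest with
      | none => simp [hj, ih hrec]
      | some pr => rw [hrec] at h; simp at h

-- pvPop: success removes exactly the first matching element
theorem pvPop_some (k : String) (X : List (List String)) (j : List String)
    (r : List (List String)) (h : pvPop k X = some (j, r)) :
    (∀ k', X.filter (fun i => pvKey i == k') =
      (if pvKey j == k' then [j] else []) ++ r.filter (fun i => pvKey i == k')) ∧ pvKey j = k := by
  induction X generalizing j r with
  | nil => simp [pvPop] at h
  | cons a rest ih =>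
    by_cases ha : pvKey a = k
    · simp only [pvPop, beq_iff_eq, ha, if_pos] at h
      obtain ⟨rfl, rfl⟩ : a = j ∧ rest = r := by simpa using h
      refine ⟨fun k' => ?_, ha⟩
      simp only [List.filter_cons]
      split <;> simp_all
    · simp only [pvPop, beq_iff_eq, ha, if_false] at h
      cases hrec : pvPop k rest with
      | none => rw [hrec] at h; simp at h
      | some pr =>
        rw [hrec] at h
        obtain ⟨m, r'⟩ := pr
        obtain ⟨rfl, rfl⟩ : m = j ∧ a :: r' = r := by simpa using h
        obtain ⟨hfilt, hkey⟩ := ih _ _ hrec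
        refine ⟨fun k' => ?_, hkey⟩
        simp only [List.filter_cons, hfilt k']
        by_cases h1 : pvKey a = k'
        · have hm : ¬ (pvKey m = k') := by rw [hkey, ← h1]; exact fun hc => ha hc.symm
          simp [hm]
        · simp [h1]

-- invariant of A's matching loop over an arbitrary current dict and exit list:
-- keys are unchanged and each key gains the zip-sum of its enter/exit segments
theorem pvAloop (E : List (List String)) (X : List (List String)) (d : PySem.Dict String Int)
    (hc : ∀ i ∈ E, d.contains (pvKey i) = true) :
    ((E.foldl (fun (st : PySem.Dict String Int × List (List String)) i =>
        match pvPop (pvKey i) st.2 with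
        | none => st
        | some (j, rest) => (st.1.modify (pvKey i) 0 (· + |pvVal (pvSeg i) - pvVal (pvSeg j)|), rest))
      (d, X)).1.keys = d.keys) ∧
    (∀ k, (E.foldl (fun (st : PySem.Dict String Int × List (List String)) i =>
        match pvPop (pvKey i) st.2 with
        | none => st
        | some (j, rest) => (st.1.modify (pvKey i) 0 (· + |pvVal (pvSeg i) - pvVal (pvSeg j)|), rest))
      (d, X)).1.getD k 0 = d.getD k 0 + pvSum (pvSegsOf E k) (pvSegsOf X k)) := by
  induction E generalizing X d with
  | nil => simp [pvSegsOf, pvSum]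
  | cons i E ih =>
    have hq : d.contains (pvKey i) = true := hc i (by simp)
    simp only [List.foldl_cons]
    cases hpop : pvPop (pvKey i) X with
    | none =>
      have hX : X.filter (fun x => pvKey x == pvKey i) = [] := pvPop_none _ _ hpop
      obtain ⟨hk, hg⟩ := ih X d (fun a ha => hc a (by simp [ha]))
      refine ⟨by simpa using hk, fun k => ?_⟩
      rw [hg k]
      congr 1
      by_cases hki : pvKey i = k
      · subst hki
        simp [pvSegsOf, hX, pvSum]
      · simp [pvSegsOf, beq_iff_eq, hki, pvSum]
    | some pr =>
      obtain ⟨j, rest⟩ := pr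
      obtain ⟨hfilt, hkeyj⟩ := pvPop_some _ _ _ _ hpop
      set c : Int := |pvVal (pvSeg i) - pvVal (pvSeg j)| with hcdef
      have hkeys' : (d.modify (pvKey i) 0 (· + c)).keys = d.keys := by
        rw [PySem.Dict.keys_modify, PySem.Dict.keys_insert_of_contains]
        simpa using hq
      have hc' : ∀ a ∈ E, (d.modify (pvKey i) 0 (· + c)).contains (pvKey a) = true := by
        intro a ha
        rw [PySem.Dict.contains_modify]
        simp [hc a (by simp [ha])]
      obtain ⟨hk, hg⟩ := ih rest (d.modify (pvKey i) 0 (· + c)) hc'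
      refine ⟨by simpa using hk.trans hkeys', fun k => ?_⟩
      rw [hg k, PySem.Dict.getD_modify]
      by_cases hki : k = pvKey i
      · subst hki
        have hXk : pvSegsOf X (pvKey i) = pvSeg j :: pvSegsOf rest (pvKey i) := by
          simp only [pvSegsOf, hfilt (pvKey i)]
          simp [hkeyj]
        have hEk : pvSegsOf (i :: E) (pvKey i) = pvSeg i :: pvSegsOf E (pvKey i) := by
          simp [pvSegsOf]
        rw [if_pos rfl, hXk, hEk]
        simp only [pvSum, List.zip_cons_cons, List.map_cons, List.sum_cons]
        ring
      · have hjk : (pvKey j == k) = false := by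
          simp [hkeyj]; exact fun h => hki h.symm
        have hik : (pvKey i == k) = false := by
          simp; exact fun h => hki h.symm
        have hXk : pvSegsOf X k = pvSegsOf rest k := by
          simp [pvSegsOf, hfilt k, hjk]
        have hEk : pvSegsOf (i :: E) k = pvSegsOf E k := by
          simp [pvSegsOf, hik]
        rw [if_neg hki, hXk, hEk]

-- A's init loop: every value is 0
theorem pvInit_getD (E : List (List String)) (d : PySem.Dict String Int) (k : String)
    (h : d.getD k 0 = 0) :
    (E.foldl (fun (d : PySem.Dict String Int) i => d.insert (pvKey i) 0) d).getD k 0 = 0 := by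
  induction E generalizing d with
  | nil => simpa
  | cons i E ih =>
    simp only [List.foldl_cons]
    exact ih _ (by rw [PySem.Dict.getD_insert]; split <;> simp [h])

-- A's first loop builds the filtered split lists
theorem pvFoldA (s : List String) :
    s.foldl (fun (st : List (List String) × List (List String)) i =>
      let st1 := if PySem.Str.isIn "Enter" i then (st.1 ++ [pvSplit i "Enter"], st.2) else st
      if PySem.Str.isIn "Exit" i then (st1.1, st1.2 ++ [pvSplit i "Exit"]) else st1)
      (([], []) : List (List String) × List (List String))
    = (pvSplits "Enter" s, pvSplits "Exit" s) := by
  have hb : (fun (st : List (List String) × List (List String)) i =>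
      let st1 := if PySem.Str.isIn "Enter" i then (st.1 ++ [pvSplit i "Enter"], st.2) else st
      if PySem.Str.isIn "Exit" i then (st1.1, st1.2 ++ [pvSplit i "Exit"]) else st1)
      = (fun st i =>
        (if PySem.Str.isIn "Enter" i then st.1 ++ [pvSplit i "Enter"] else st.1,
         if PySem.Str.isIn "Exit" i then st.2 ++ [pvSplit i "Exit"] else st.2)) := by
    funext st i; dsimp only; split_ifs <;> rfl
  rw [hb, PySem.List.foldl_prod_mk
        (f := fun (a : List (List String)) i => if PySem.Str.isIn "Enter" i then a ++ [pvSplit i "Enter"] else a)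
        (g := fun (a : List (List String)) i => if PySem.Str.isIn "Exit" i then a ++ [pvSplit i "Exit"] else a),
      PySem.List.foldl_append_if, PySem.List.foldl_append_if]
  simp only [List.nil_append, pvSplits]

-- B's loop builds the two grouping dicts, each a fold over the (key, segment) pairs
theorem pvFoldB (s : List String) :
    s.foldl (fun (st : PySem.Dict String (List String) × PySem.Dict String (List String)) line =>
      let st1 := if PySem.Str.isIn "Enter" line then
          (st.1.modify (pvKey (pvSplit line "Enter")) [] (· ++ [pvSeg (pvSplit line "Enter")]), st.2)
        else st
      if PySem.Str.isIn "Exit" line then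
          (st1.1, st1.2.modify (pvKey (pvSplit line "Exit")) [] (· ++ [pvSeg (pvSplit line "Exit")]))
        else st1)
      (PySem.Dict.empty, PySem.Dict.empty)
    = ((pvPairs "Enter" s).foldl (fun d p => d.modify p.1 [] (· ++ [p.2])) PySem.Dict.empty,
       (pvPairs "Exit" s).foldl (fun d p => d.modify p.1 [] (· ++ [p.2])) PySem.Dict.empty) := by
  have hb : (fun (st : PySem.Dict String (List String) × PySem.Dict String (List String)) line =>
      let st1 := if PySem.Str.isIn "Enter" line then
          (st.1.modify (pvKey (pvSplit line "Enter")) [] (· ++ [pvSeg (pvSplit line "Enter")]), st.2)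
        else st
      if PySem.Str.isIn "Exit" line then
          (st1.1, st1.2.modify (pvKey (pvSplit line "Exit")) [] (· ++ [pvSeg (pvSplit line "Exit")]))
        else st1)
      = (fun st line =>
        (if PySem.Str.isIn "Enter" line then st.1.modify (pvKey (pvSplit line "Enter")) [] (· ++ [pvSeg (pvSplit line "Enter")]) else st.1,
         if PySem.Str.isIn "Exit" line then st.2.modify (pvKey (pvSplit line "Exit")) [] (· ++ [pvSeg (pvSplit line "Exit")]) else st.2)) := by
    funext st line; dsimp only; split_ifs <;> rfl
  rw [hb, PySem.List.foldl_prod_mk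
        (f := fun (d : PySem.Dict String (List String)) line => if PySem.Str.isIn "Enter" line then d.modify (pvKey (pvSplit line "Enter")) [] (· ++ [pvSeg (pvSplit line "Enter")]) else d)
        (g := fun (d : PySem.Dict String (List String)) line => if PySem.Str.isIn "Exit" line then d.modify (pvKey (pvSplit line "Exit")) [] (· ++ [pvSeg (pvSplit line "Exit")]) else d)]
  congr 1 <;>
  · rw [PySem.List.foldl_if_eq_foldl_filter]
    rw [pvPairs, List.foldl_map]

-- the grouping dict's lookups
theorem pvGetD_group (P : List (String × String)) (k : String) :
    (P.foldl (fun (d : PySem.Dict String (List String)) p => d.modify p.1 [] (· ++ [p.2])) PySem.Dict.empty).getD k []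
      = (P.filter (fun p => p.1 == k)).map Prod.snd := by
  simpa using PySem.Dict.getD_foldl_modify_append P PySem.Dict.empty k

-- the grouped pairs carry the same segments as A's split lists
theorem pvSegsOf_pairs (sep : String) (s : List String) (k : String) :
    ((pvPairs sep s).filter (fun p => p.1 == k)).map Prod.snd = pvSegsOf (pvSplits sep s) k := by
  simp [pvPairs, pvSplits, pvSegsOf, List.filter_map, List.map_map]

-- the two key lists agree
theorem pvKeys_eq (sep : String) (s : List String) :
    (pvPairs sep s).map Prod.fst = (pvSplits sep s).map pvKey := by
  simp [pvPairs, pvSplits, List.map_map]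

theorem runTime_eq_alt (s : List String) : runTime s = runTime_alt s := by
  unfold runTime runTime_alt
  rw [pvFoldA, pvFoldB]
  dsimp only
  -- A side
  have hkeys0 : ((pvSplits "Enter" s).foldl (fun (d : PySem.Dict String Int) i => d.insert (pvKey i) 0) PySem.Dict.empty).keys
      = PySem.Set.ofList ((pvSplits "Enter" s).map pvKey) := by
    rw [PySem.Dict.keys_foldl_insert_key (pvSplits "Enter" s) pvKey (fun _ _ => 0) PySem.Dict.empty]
    rfl
  have hnodup0 : ((pvSplits "Enter" s).foldl (fun (d : PySem.Dict String Int) i => d.insert (pvKey i) 0) PySem.Dict.empty).keys.Nodup :=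
    PySem.Dict.nodup_keys_foldl_insert_key _ pvKey (fun _ _ => 0) _ PySem.Dict.nodup_keys_empty
  have hcont : ∀ i ∈ pvSplits "Enter" s,
      ((pvSplits "Enter" s).foldl (fun (d : PySem.Dict String Int) i => d.insert (pvKey i) 0) PySem.Dict.empty).contains (pvKey i) = true := by
    intro i hi
    rw [PySem.Dict.contains_iff_mem_keys, hkeys0, PySem.Set.mem_ofList]
    exact List.mem_map_of_mem hi
  obtain ⟨hkF, hgF⟩ := pvAloop (pvSplits "Enter" s) (pvSplits "Exit" s) _ hcont
  rw [PySem.Dict.items_eq_map_keys _ (hkF ▸ hnodup0) 0, hkF, hkeys0]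
  -- B side
  have hkeysB : ((pvPairs "Enter" s).foldl (fun (d : PySem.Dict String (List String)) p => d.modify p.1 [] (· ++ [p.2])) PySem.Dict.empty).keys
      = PySem.Set.ofList ((pvSplits "Enter" s).map pvKey) := by
    rw [PySem.Dict.keys_foldl_modify_key (pvPairs "Enter" s) Prod.fst [] (fun _ p => (· ++ [p.2])) PySem.Dict.empty]
    rw [pvKeys_eq]
    rfl
  have hnodupB : ((pvPairs "Enter" s).foldl (fun (d : PySem.Dict String (List String)) p => d.modify p.1 [] (· ++ [p.2])) PySem.Dict.empty).keys.Nodup :=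
    PySem.Dict.nodup_keys_foldl_modify_key _ Prod.fst [] (fun _ p => (· ++ [p.2])) _ PySem.Dict.nodup_keys_empty
  rw [PySem.Dict.items_eq_map_keys _ hnodupB [], hkeysB, List.map_map]
  -- pointwise
  refine List.map_congr_left (fun k _ => ?_)
  rw [hgF k, pvInit_getD _ _ _ (by simp [PySem.Dict.getD_empty])]
  simp only [Function.comp, pvGetD_group, pvSegsOf_pairs, zero_add]
  rfl

-- ===== VERDICT (by name: the statement is the Claim_ definition above) =====
theorem runTime_spec : Claim_equal_runTime := by
  intro s _ _
  exact runTime_eq_alt s
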